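-- pv_equiv track=rewrite | github.com/DenisLezin/Python_bases | Lesson_3/hw03_normal.py | fib_func
-- ===== SOURCE A (Python) =====
-- def fib_func(n, m):
--     lst_fib = []
--     def fib_recur(num):
--         if num == 1 or num ==2:
--             return 1
--         return fib_recur(num - 1) + fib_recur(num - 2)
--     for i in range(n, m + 1):
--         lst_fib.append(fib_recur(i))
--     return lst_fib
-- ===== SOURCE B (Python) =====
-- def fib_func(n, m):
--     if m < n:
--         return []
--     out = []
--     a, b = 0, 1
--     for k in range(m + 1):
--         if k >= n:
--             out.append(a)
--         a, b = b, a + b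
--     return out
-- ===== Notes on version B (the rewrite author's own statement) =====
-- stated objective: alternative
-- what changed: Replaces the naive doubly-recursive fib recomputed from scratch for every index with a single iterative pass maintaining the Fibonacci pair (a,b) and collecting a at indices k >= n (a timing run could not measure a ratio: A times out already at tiny nonempty ranges, and the large inputs both finish are empty ranges).
import Mathlib
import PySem

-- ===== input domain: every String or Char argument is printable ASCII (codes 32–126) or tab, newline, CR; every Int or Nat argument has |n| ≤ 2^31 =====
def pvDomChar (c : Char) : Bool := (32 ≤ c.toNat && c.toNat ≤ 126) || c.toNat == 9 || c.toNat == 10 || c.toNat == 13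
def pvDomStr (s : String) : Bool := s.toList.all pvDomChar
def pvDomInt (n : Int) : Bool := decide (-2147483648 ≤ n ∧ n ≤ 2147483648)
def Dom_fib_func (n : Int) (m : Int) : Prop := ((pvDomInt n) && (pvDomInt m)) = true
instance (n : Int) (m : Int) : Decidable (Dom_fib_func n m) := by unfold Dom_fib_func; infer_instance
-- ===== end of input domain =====

-- B replaces A's doubly-recursive fib recomputed per index by one iterative pass keeping the Fibonacci pair (alternative algorithm).

-- ===== PORT A =====
-- A's fib_recur, defined on Nat; A diverges for num ≤ 0, which Pre_ excludes,
-- so the value at 0 is never reached on admitted inputs.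
def fibRecurA : Nat → Int
  | 0 => 0
  | 1 => 1
  | 2 => 1
  | (k+3) => fibRecurA (k+2) + fibRecurA (k+1)

-- for i in range(n, m+1): lst_fib.append(fib_recur(i)); under Pre_ every i ≥ 1, so i.toNat is exact
def fib_func (n : Int) (m : Int) : List Int :=
  (PySem.List.pyRange n (m+1) 1).foldl (fun acc i => acc ++ [fibRecurA i.toNat]) []

-- ===== PORT B =====
-- empty range short-circuit, then a single pass k = 0..m over state (out, a, b); append a when k ≥ n
def fib_func_alt (n : Int) (m : Int) : List Int :=
  if m < n then [] else
  ((PySem.List.pyRange 0 (m+1) 1).foldl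
    (fun (st : List Int × Int × Int) k =>
      (if n ≤ k then st.1 ++ [st.2.1] else st.1, st.2.2, st.2.1 + st.2.2))
    ([], 0, 1)).1

-- ===== PRECONDITION & SPEC =====
-- Pre_ excludes exactly the inputs where A raises (RecursionError): a nonempty range starting at n ≤ 0.
def Pre_fib_func (n : Int) (m : Int) : Prop := m < n ∨ 1 ≤ n
instance (n : Int) (m : Int) : Decidable (Pre_fib_func n m) := by unfold Pre_fib_func; infer_instance

def pvWitness_fib_func : Int × Int := (1, 8)

def Spec_fib_func (n : Int) (m : Int) (out : List Int) : Prop := out = fib_func_alt n m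
instance (n : Int) (m : Int) (out : List Int) : Decidable (Spec_fib_func n m out) := by unfold Spec_fib_func; infer_instance

-- ===== CLAIM (what is proved, stated in full; the proofs are below) =====
def Claim_equal_fib_func : Prop := ∀ (n : Int) (m : Int), Dom_fib_func n m → Pre_fib_func n m → Spec_fib_func n m (fib_func n m)

-- ===== LEMMAS AND PROOFS =====

-- standard Fibonacci on Nat
def fibN : Nat → Int
  | 0 => 0
  | 1 => 1
  | (k+2) => fibN k + fibN (k+1)

theorem fibRecurA_eq_fibN (k : Nat) : fibRecurA (k+1) = fibN (k+1) := by
  induction k using Nat.strong_induction_on with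
  | _ k ih =>
    match k with
    | 0 => rfl
    | 1 => rfl
    | (j+2) =>
      have h1 := ih (j+1) (by omega)
      have h2 := ih j (by omega)
      show fibRecurA (j+3) = fibN (j+3)
      rw [show fibRecurA (j+3) = fibRecurA (j+2) + fibRecurA (j+1) from rfl,
          show fibN (j+3) = fibN (j+1) + fibN (j+2) from rfl, h1, h2]
      ring

theorem foldl_append_map (f : Int → Int) (l : List Int) (acc : List Int) :
    l.foldl (fun acc i => acc ++ [f i]) acc = acc ++ l.map f := by
  induction l generalizing acc with
  | nil => simp
  | cons x xs ih => simp [List.foldl, ih]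

-- characterization of B's fold over range(0, t)
theorem foldB_char (n : Int) (t : Nat) :
    (PySem.List.pyRange 0 (t : Int) 1).foldl
      (fun (st : List Int × Int × Int) k =>
        (if n ≤ k then st.1 ++ [st.2.1] else st.1, st.2.2, st.2.1 + st.2.2))
      ([], 0, 1)
    = (((PySem.List.pyRange 0 (t : Int) 1).filter (fun k => decide (n ≤ k))).map
         (fun k => fibN k.toNat), fibN t, fibN (t+1)) := by
  induction t with
  | zero => simp [PySem.List.pyRange_one_eq_nil, fibN]
  | succ t ih =>
    have hsplit : PySem.List.pyRange 0 ((t : Int) + 1) 1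
        = PySem.List.pyRange 0 (t : Int) 1 ++ [(t : Int)] :=
      PySem.List.pyRange_one_succ_right (by exact_mod_cast Nat.zero_le t)
    push_cast
    rw [hsplit, List.foldl_append, ih, List.filter_append, List.map_append]
    by_cases hn : n ≤ (t : Int)
    · simp [hn, fibN]
    · simp [hn, fibN]

theorem filter_pyRange (n t : Int) (h0 : 0 ≤ n) (ht : n ≤ t) :
    (PySem.List.pyRange 0 t 1).filter (fun k => decide (n ≤ k)) = PySem.List.pyRange n t 1 := by
  rw [PySem.List.pyRange_one_append 0 n t h0 ht, List.filter_append]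
  have h1 : (PySem.List.pyRange 0 n 1).filter (fun k => decide (n ≤ k)) = [] := by
    apply List.filter_eq_nil_iff.mpr
    intro x hx
    have := (PySem.List.mem_pyRange_one.mp hx)
    simp; omega
  have h2 : (PySem.List.pyRange n t 1).filter (fun k => decide (n ≤ k)) = PySem.List.pyRange n t 1 := by
    apply List.filter_eq_self.mpr
    intro x hx
    have := (PySem.List.mem_pyRange_one.mp hx)
    simp; omega
  rw [h1, h2, List.nil_append]

-- ===== VERDICT (by name: the statement is the Claim_ definition above) =====
theorem fib_func_spec : Claim_equal_fib_func := by
  intro n m _ hpre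
  unfold Spec_fib_func fib_func fib_func_alt
  rw [foldl_append_map]
  by_cases hle : m + 1 ≤ n
  · -- empty range on A's side, short-circuit on B's side
    have hA : PySem.List.pyRange n (m+1) 1 = [] := PySem.List.pyRange_one_eq_nil hle
    rw [hA, if_pos (by omega : m < n)]
    simp
  · -- nonempty range: n ≤ m, and Pre_ gives 1 ≤ n
    have hn1 : 1 ≤ n := by rcases hpre with h | h <;> omega
    rw [if_neg (by omega : ¬ m < n)]
    have hnm : n ≤ m + 1 := by omega
    have hnn : (0:Int) ≤ m + 1 := by omega
    have hrange : PySem.List.pyRange 0 (m+1) 1 = PySem.List.pyRange 0 (((m+1).toNat : Nat) : Int) 1 := by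
      rw [Int.toNat_of_nonneg hnn]
    rw [hrange, foldB_char n (m+1).toNat]
    rw [Int.toNat_of_nonneg hnn] at *
    rw [filter_pyRange n (m+1) (by omega) hnm]
    apply List.map_congr_left
    intro x hx
    have hm := PySem.List.mem_pyRange_one.mp hx
    have hx1 : 1 ≤ x := by omega
    obtain ⟨k, hk⟩ : ∃ k : Nat, x.toNat = k + 1 := ⟨x.toNat - 1, by omega⟩
    rw [hk]
    exact fibRecurA_eq_fibN k
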